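-- pv_equiv track=rewrite | github.com/ow1609/coding-challenges | codewars/bubblesort/bubblesort.py | bubblesort_once
-- ===== SOURCE A (Python) =====
-- def bubblesort_once(l):
--     # create a shallow copy of the list
--     res = l[:]
--
--     for i in range(0, len(res) - 1):
--         if res[i] > res[i + 1]:
--             temp = res[i]
--             res[i] = res[i + 1]
--             res[i + 1] = temp
--
--     return res
-- ===== SOURCE B (Python) =====
-- def bubblesort_once(l):
--     if not l:
--         return []
--     out = []
--     carry = l[0]
--     for e in l[1:]:
--         if carry > e:
--             out.append(e)
--         else:
--             out.append(carry)
--             carry = e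
--     out.append(carry)
--     return out
-- ===== Notes on version B (the rewrite author's own statement) =====
-- stated objective: alternative
-- what changed: Replaces the in-place index loop with conditional swaps on a list copy by a carry-accumulator fold that builds the output list front-to-back without any indexing or mutation of shared positions.
import Mathlib
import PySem

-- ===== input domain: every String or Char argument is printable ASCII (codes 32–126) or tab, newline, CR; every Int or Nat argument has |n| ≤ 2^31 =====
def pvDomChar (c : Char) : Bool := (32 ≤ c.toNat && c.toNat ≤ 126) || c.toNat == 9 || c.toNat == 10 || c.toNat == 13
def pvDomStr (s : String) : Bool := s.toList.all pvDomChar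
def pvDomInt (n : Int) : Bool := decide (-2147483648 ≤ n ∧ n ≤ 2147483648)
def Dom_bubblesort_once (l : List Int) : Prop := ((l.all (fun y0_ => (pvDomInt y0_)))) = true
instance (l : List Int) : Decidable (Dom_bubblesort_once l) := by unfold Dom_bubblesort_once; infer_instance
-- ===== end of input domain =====

-- B replaces A's in-place swap loop over indices by a carry-accumulator fold building the output list; same cost, different decomposition.


-- ===== PORT A =====
-- one step of the loop body: compare res[i] with res[i+1], swap if out of order
def bubbleStep (res : List Int) (i : Nat) : List Int :=
  let a := res.getD i 0
  let b := res.getD (i + 1) 0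
  if a > b then (res.set i b).set (i + 1) a else res

-- for i in range(0, len(res) - 1): … ; indices are 0 ≤ i < len-1, always in range
def bubblesort_once (l : List Int) : List Int :=
  (List.range (l.length - 1)).foldl bubbleStep l

-- ===== PORT B =====
-- the loop over l[1:] with accumulator `out` and the current `carry`
def carryLoop (carry : Int) : List Int → List Int
  | [] => [carry]
  | e :: rest => if carry > e then e :: carryLoop carry rest else carry :: carryLoop e rest

def bubblesort_once_alt (l : List Int) : List Int :=
  match l with
  | [] => []
  | x :: xs => carryLoop x xs

-- ===== PRECONDITION & SPEC =====
def Spec_bubblesort_once (l : List Int) (out : List Int) : Prop := out = bubblesort_once_alt l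
instance (l : List Int) (out : List Int) : Decidable (Spec_bubblesort_once l out) := by unfold Spec_bubblesort_once; infer_instance

-- ===== CLAIM (what is proved, stated in full; the proofs are below) =====
def Claim_equal_bubblesort_once : Prop := ∀ (l : List Int), Dom_bubblesort_once l → Spec_bubblesort_once l (bubblesort_once l)

-- ===== LEMMAS AND PROOFS =====

theorem getD_append_self (p : List Int) (c : Int) (t : List Int) :
    (p ++ c :: t).getD p.length 0 = c := by
  simp [List.getD]

theorem getD_append_succ (p : List Int) (c e : Int) (t : List Int) :
    (p ++ c :: e :: t).getD (p.length + 1) 0 = e := by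
  simp [List.getD]

theorem set_append_self (p : List Int) (c : Int) (t : List Int) (v : Int) :
    (p ++ c :: t).set p.length v = p ++ v :: t := by
  induction p with
  | nil => simp
  | cons a q ih => simp [ih]

-- loop invariant: processing indices k, k+1, … over state p ++ carry :: rest (|p| = k)
-- yields p ++ carryLoop carry rest
theorem fold_invariant (rest : List Int) :
    ∀ (p : List Int) (carry : Int),
      (List.range' p.length rest.length).foldl bubbleStep (p ++ carry :: rest)
        = p ++ carryLoop carry rest := by
  induction rest with
  | nil => intro p carry; simp [carryLoop]
  | cons e rest' ih =>
    intro p carry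
    have hrange : List.range' p.length (e :: rest').length
        = p.length :: List.range' (p.length + 1) rest'.length := by
      simp [List.range'_succ]
    rw [hrange]
    simp only [List.foldl_cons]
    by_cases h : carry > e
    · have hstep : bubbleStep (p ++ carry :: e :: rest') p.length
          = (p ++ [e]) ++ carry :: rest' := by
        simp only [bubbleStep, getD_append_self, getD_append_succ, if_pos h,
          set_append_self]
        simp
      rw [hstep]
      have hlen : p.length + 1 = (p ++ [e]).length := by simp
      rw [hlen, ih (p ++ [e]) carry]
      simp [carryLoop, h]
    · have hstep : bubbleStep (p ++ carry :: e :: rest') p.length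
          = (p ++ [carry]) ++ e :: rest' := by
        simp [bubbleStep, h]
      rw [hstep]
      have hlen : p.length + 1 = (p ++ [carry]).length := by simp
      rw [hlen, ih (p ++ [carry]) e]
      simp [carryLoop, h]

-- ===== VERDICT (by name: the statement is the Claim_ definition above) =====
theorem bubblesort_once_spec : Claim_equal_bubblesort_once := by
  intro l _
  unfold Spec_bubblesort_once bubblesort_once bubblesort_once_alt
  match l with
  | [] => simp
  | x :: xs =>
    have := fold_invariant xs [] x
    simpa [List.range_eq_range'] using this
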